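-- pv_equiv track=rewrite | github.com/faishaltm/Waw-Quran-Companion | scripts/tools/analyze_balaghah_tier1.py | find_repeated_subsequences
-- ===== SOURCE A (Python) =====
-- from collections import Counter, defaultdict
--
-- def find_repeated_subsequences(sequence, min_length=2):
--     """
--     Find repeated subsequences in a sequence (e.g., POS tags)
--
--     Args:
--         sequence: List of elements
--         min_length: Minimum length of pattern to detect
--
--     Returns:
--         Dict of {pattern: count}
--     """
--     if not sequence or len(sequence) < min_length * 2:
--         return {}
--
--     patterns = defaultdict(int)
--     n = len(sequence)
--
--     # Try all possible pattern lengths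
--     for length in range(min_length, n // 2 + 1):
--         # Try all starting positions
--         for i in range(n - length + 1):
--             pattern = tuple(sequence[i:i+length])
--
--             # Search for this pattern elsewhere in sequence
--             for j in range(i + length, n - length + 1):
--                 if tuple(sequence[j:j+length]) == pattern:
--                     patterns[pattern] += 1
--                     break  # Count each unique pattern once per occurrence
--
--     # Filter out patterns with no repetitions
--     return {k: v for k, v in patterns.items() if v > 0}
-- ===== SOURCE B (Python) =====
-- def find_repeated_subsequences(sequence, min_length=2):
--     """Same result as A, but the inner backwards scan is replaced by a
--     last-occurrence hash index built once per window length."""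
--     n = len(sequence)
--     result = {}
--     for length in range(max(min_length, 1), n // 2 + 1):
--         windows = [tuple(sequence[i:i + length]) for i in range(n - length + 1)]
--         last = {}
--         for j in range(len(windows) - 1, -1, -1):
--             if windows[j] not in last:
--                 last[windows[j]] = j
--         for i, w in enumerate(windows):
--             if last[w] >= i + length:
--                 result[w] = result.get(w, 0) + 1
--     return result
-- ===== Notes on version B (the rewrite author's own statement) =====
-- stated objective: alternative
-- what changed: A's inner linear scan for a later non-overlapping match is removed: B builds, once per window length, a hash map from window content to its last occurrence index (one reverse pass) and decides each start position with one lookup; it trades A's early-exit scan (cheap when matches are near) for index construction, so overall cost is similar.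
-- intended difference: For nonempty sequences with min_length at most zero, A also iterates degenerate Python slice lengths down to min_length and so always reports a zero-length pattern with a positive count, an accident of slice semantics; B considers only genuine pattern lengths of at least one element, which is what a minimum-pattern-length parameter intends. — e.g. on find_repeated_subsequences(["a", "b"], 0): A returns [([], 3)], B returns []
import Mathlib
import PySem

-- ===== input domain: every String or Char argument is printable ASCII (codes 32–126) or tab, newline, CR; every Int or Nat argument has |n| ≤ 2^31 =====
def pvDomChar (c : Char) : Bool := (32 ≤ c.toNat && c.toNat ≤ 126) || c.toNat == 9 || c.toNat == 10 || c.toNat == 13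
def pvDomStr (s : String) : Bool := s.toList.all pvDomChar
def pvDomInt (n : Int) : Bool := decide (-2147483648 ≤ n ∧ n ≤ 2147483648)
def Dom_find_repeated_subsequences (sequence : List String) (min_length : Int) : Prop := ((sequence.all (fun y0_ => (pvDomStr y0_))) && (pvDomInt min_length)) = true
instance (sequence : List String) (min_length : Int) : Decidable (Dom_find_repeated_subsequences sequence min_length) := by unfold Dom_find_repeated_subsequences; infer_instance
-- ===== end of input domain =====

-- B replaces A's inner scan for a later non-overlapping match by a last-occurrence hash index
-- built once per window length (objective: alternative); for min_length ≤ 0 B intentionally differs (see D_).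

-- ===== PORT A =====
-- the inner 'for j …: if …: patterns[pattern] += 1; break' increments once iff some j matches,
-- which is exactly 'if (range …).any (match) then increment'.
def aInner (sequence : List String) (n length : Int)
    (d : PySem.Dict (List String) Int) : PySem.Dict (List String) Int :=
  (PySem.List.pyRange 0 (n - length + 1)).foldl (fun d i =>
    let pattern := PySem.List.slice sequence (some i) (some (i + length))
    if (PySem.List.pyRange (i + length) (n - length + 1)).any
         (fun j => PySem.List.slice sequence (some j) (some (j + length)) == pattern)
    then d.modify pattern 0 (· + 1)
    else d) d

def find_repeated_subsequences (sequence : List String) (min_length : Int) : List (List String × Int) :=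
  if sequence = [] ∨ PySem.List.len sequence < min_length * 2 then []
  else
    let n := PySem.List.len sequence
    let patterns :=
      (PySem.List.pyRange min_length (PySem.Int.floordiv n 2 + 1)).foldl
        (fun d length => aInner sequence n length d) PySem.Dict.empty
    patterns.items.filter (fun kv => 0 < kv.2)

-- ===== PORT B =====
def bWindows (sequence : List String) (n length : Int) : List (List String) :=
  (PySem.List.pyRange 0 (n - length + 1)).map
    (fun i => PySem.List.slice sequence (some i) (some (i + length)))

-- reverse pass: first insertion wins, so each window maps to its LAST occurrence index
def bLast (windows : List (List String)) : PySem.Dict (List String) Int :=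
  (PySem.List.pyRange (PySem.List.len windows - 1) (-1) (-1)).foldl
    (fun d j =>
      let w := PySem.List.pyGetD windows j []
      if d.contains w then d else d.insert w j) PySem.Dict.empty

-- 'last[w]' always hits (w is a window), so the total 'getD … 0' is exact
def bInner (sequence : List String) (n length : Int)
    (result : PySem.Dict (List String) Int) : PySem.Dict (List String) Int :=
  (PySem.List.enumerate (bWindows sequence n length)).foldl (fun result iw =>
    if iw.1 + length ≤ (bLast (bWindows sequence n length)).getD iw.2 0
    then result.insert iw.2 (result.getD iw.2 0 + 1)
    else result) result

def find_repeated_subsequences_alt (sequence : List String) (min_length : Int) : List (List String × Int) :=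
  let n := PySem.List.len sequence
  let result :=
    (PySem.List.pyRange (max min_length 1) (PySem.Int.floordiv n 2 + 1)).foldl
      (fun result length => bInner sequence n length result) PySem.Dict.empty
  result.items

-- ===== PRECONDITION & SPEC =====
-- On nonempty sequences with min_length at most zero, A also iterates degenerate Python slice
-- lengths down to min_length and so always reports a zero-length pattern with a positive count —
-- an accident of slice semantics; B considers only genuine pattern lengths of at least one
-- element, which is what a minimum-pattern-length parameter intends.
def D_find_repeated_subsequences (sequence : List String) (min_length : Int) : Prop :=
  sequence ≠ [] ∧ min_length ≤ 0
instance (sequence : List String) (min_length : Int) : Decidable (D_find_repeated_subsequences sequence min_length) := by unfold D_find_repeated_subsequences; infer_instance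

def Spec_find_repeated_subsequences (sequence : List String) (min_length : Int) (out : List (List String × Int)) : Prop := ¬ D_find_repeated_subsequences sequence min_length → out = find_repeated_subsequences_alt sequence min_length
instance (sequence : List String) (min_length : Int) (out : List (List String × Int)) : Decidable (Spec_find_repeated_subsequences sequence min_length out) := by unfold Spec_find_repeated_subsequences; infer_instance

def pvDiffWitness_find_repeated_subsequences : List String × Int := (["a", "b"], 0)
def pvDiffWitnessOut_find_repeated_subsequences : (List (List String × Int)) × (List (List String × Int)) := ([([], 3)], [])

-- ===== CLAIM (what is proved, stated in full; the proofs are below) =====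
def Claim_unchanged_find_repeated_subsequences : Prop := ∀ (sequence : List String) (min_length : Int), Dom_find_repeated_subsequences sequence min_length → Spec_find_repeated_subsequences sequence min_length (find_repeated_subsequences sequence min_length)
def Claim_changed_find_repeated_subsequences : Prop := Dom_find_repeated_subsequences (pvDiffWitness_find_repeated_subsequences.1) (pvDiffWitness_find_repeated_subsequences.2) ∧ D_find_repeated_subsequences (pvDiffWitness_find_repeated_subsequences.1) (pvDiffWitness_find_repeated_subsequences.2) ∧ find_repeated_subsequences (pvDiffWitness_find_repeated_subsequences.1) (pvDiffWitness_find_repeated_subsequences.2) = pvDiffWitnessOut_find_repeated_subsequences.1 ∧ find_repeated_subsequences_alt (pvDiffWitness_find_repeated_subsequences.1) (pvDiffWitness_find_repeated_subsequences.2) = pvDiffWitnessOut_find_repeated_subsequences.2 ∧ pvDiffWitnessOut_find_repeated_subsequences.1 ≠ pvDiffWitnessOut_find_repeated_subsequences.2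
def Claim_exact_find_repeated_subsequences : Prop := ∀ (sequence : List String) (min_length : Int), Dom_find_repeated_subsequences sequence min_length → D_find_repeated_subsequences sequence min_length → find_repeated_subsequences sequence min_length ≠ find_repeated_subsequences_alt sequence min_length

-- ===== LEMMAS AND PROOFS =====

-- each item of an inserted dict is an old item or the new pair
theorem pv_mem_items_insert {κ ν : Type} [BEq κ] (d : PySem.Dict κ ν) (k : κ) (v : ν)
    (kv : κ × ν) (h : kv ∈ (d.insert k v).items) : kv ∈ d.items ∨ kv = (k, v) := by
  unfold PySem.Dict.insert at h
  split at h
  · simp only [List.mem_map] at h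
    obtain ⟨p, hp, hpe⟩ := h
    by_cases hb : p.1 == k
    · right; rw [if_pos hb] at hpe; exact hpe.symm
    · left; rw [if_neg hb] at hpe; exact hpe ▸ hp
  · simp only [List.mem_append, List.mem_singleton] at h
    exact h

-- get? after a "first insertion wins" fold is the first hit in the scanned order
theorem pv_get?_firstwins {κ : Type} [BEq κ] [LawfulBEq κ] [DecidableEq κ] (f : Int → κ)
    (l : List Int) (d : PySem.Dict κ Int) (x : κ) :
    ((l.foldl (fun d j => if d.contains (f j) then d else d.insert (f j) j) d).get? x)
      = (d.get? x).or (l.find? (fun j => f j == x)) := by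
  induction l generalizing d with
  | nil => simp
  | cons j l ih =>
    simp only [List.foldl_cons]
    by_cases hc : d.contains (f j)
    · rw [if_pos hc, ih]
      by_cases hx : (f j == x) = true
      · have hfx : f j = x := eq_of_beq hx
        have hs : ∃ v, d.get? x = some v := by
          cases h : d.get? x with
          | none =>
            rw [PySem.Dict.get?_eq_none_iff_contains] at h
            rw [hfx, h] at hc
            exact absurd hc (by simp)
          | some v => exact ⟨v, rfl⟩
        obtain ⟨v, hv⟩ := hs
        simp [hv]
      · simp [hx]
    · rw [if_neg hc, ih]
      by_cases hx : (f j == x) = true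
      · have hfx : x = f j := (eq_of_beq hx).symm
        have hn : d.get? x = none := by
          rw [PySem.Dict.get?_eq_none_iff_contains, hfx]
          exact Bool.not_eq_true _ ▸ (by simpa using hc)
        rw [PySem.Dict.get?_insert, if_pos hfx, hn]
        simp [hx]
      · rw [PySem.Dict.get?_insert, if_neg (fun he => hx (by rw [he]; exact beq_self_eq_true _))]
        simp [hx]

-- on a strictly descending list, find? returns the maximum element satisfying the predicate
theorem pv_find?_desc_max {p : Int → Bool} (l : List Int) (hl : l.Pairwise (· > ·)) :
    ∀ a, l.find? p = some a → ∀ b ∈ l, p b = true → b ≤ a := by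
  induction l with
  | nil => intro a ha; simp at ha
  | cons x l ih =>
    intro a ha b hb hpb
    rcases List.pairwise_cons.mp hl with ⟨hx, hl'⟩
    rcases List.mem_cons.mp hb with rfl | hbl
    · rw [List.find?_cons, hpb] at ha
      simp at ha; omega
    · cases hpx : p x with
      | true =>
        rw [List.find?_cons, hpx] at ha; simp at ha
        exact le_of_lt (ha ▸ hx b hbl)
      | false =>
        rw [List.find?_cons, hpx] at ha
        exact ih hl' a ha b hbl hpb

theorem pv_window_get (seq : List String) (n length j : Int)
    (hj0 : 0 ≤ j) (hjL : j < n - length + 1) :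
    PySem.List.pyGetD (bWindows seq n length) j []
      = PySem.List.slice seq (some j) (some (j + length)) := by
  unfold bWindows
  exact PySem.List.pyGetD_map_pyRange_of_nonneg _ _ _ _ hj0 hjL

theorem pv_len_windows (seq : List String) (n length : Int) (hL : 0 ≤ n - length + 1) :
    PySem.List.len (bWindows seq n length) = n - length + 1 := by
  unfold bWindows
  rw [PySem.List.len_eq, List.length_map, PySem.List.length_pyRange_one]
  omega

-- A's inner "is there a later non-overlapping occurrence?" scan agrees with B's
-- last-occurrence-index test
theorem pv_cond_iff (seq : List String) (n length i : Int)
    (h1 : 1 ≤ length) (hi0 : 0 ≤ i) (hiL : i < n - length + 1) :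
    ((PySem.List.pyRange (i + length) (n - length + 1)).any
        (fun j => PySem.List.slice seq (some j) (some (j + length))
                    == PySem.List.slice seq (some i) (some (i + length))) = true)
      ↔ i + length ≤ (bLast (bWindows seq n length)).getD
            (PySem.List.slice seq (some i) (some (i + length))) 0 := by
  set L := n - length + 1 with hLdef
  set w := PySem.List.slice seq (some i) (some (i + length)) with hw
  have hfold : bLast (bWindows seq n length)
      = (PySem.List.pyRange (L - 1) (-1) (-1)).foldl
          (fun d j => if d.contains (PySem.List.pyGetD (bWindows seq n length) j [])
                      then d else d.insert (PySem.List.pyGetD (bWindows seq n length) j []) j)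
          PySem.Dict.empty := by
    unfold bLast
    rw [pv_len_windows seq n length (by omega)]
  have hget : (bLast (bWindows seq n length)).get? w
      = (PySem.List.pyRange (L - 1) (-1) (-1)).find?
          (fun j => PySem.List.pyGetD (bWindows seq n length) j [] == w) := by
    rw [hfold, pv_get?_firstwins]
    rfl
  have hrev : PySem.List.pyRange (L - 1) (-1) (-1) = (PySem.List.pyRange 0 L).reverse := by
    rw [PySem.List.pyRange_neg_one_eq_reverse]
    norm_num
  have hpair : (PySem.List.pyRange (L - 1) (-1) (-1)).Pairwise (· > ·) := by
    rw [hrev, List.pairwise_reverse]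
    exact PySem.List.pairwise_lt_pyRange_one 0 L
  have hmemi : i ∈ PySem.List.pyRange (L - 1) (-1) (-1) := by
    rw [PySem.List.mem_pyRange_neg_one]; omega
  have hpi : (PySem.List.pyGetD (bWindows seq n length) i [] == w) = true := by
    rw [pv_window_get seq n length i hi0 hiL, ← hw]
    exact beq_self_eq_true w
  obtain ⟨j0, hj0⟩ : ∃ j0, (PySem.List.pyRange (L - 1) (-1) (-1)).find?
      (fun j => PySem.List.pyGetD (bWindows seq n length) j [] == w) = some j0 :=
    Option.isSome_iff_exists.mp (List.find?_isSome.mpr ⟨i, hmemi, hpi⟩)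
  have hj0mem := List.mem_of_find?_eq_some hj0
  rw [PySem.List.mem_pyRange_neg_one] at hj0mem
  have hj0p : PySem.List.slice seq (some j0) (some (j0 + length)) = w := by
    have hp := List.find?_some hj0
    rw [pv_window_get seq n length j0 (by omega) (by omega)] at hp
    exact eq_of_beq hp
  have hmax : ∀ b ∈ PySem.List.pyRange (L - 1) (-1) (-1),
      (PySem.List.pyGetD (bWindows seq n length) b [] == w) = true → b ≤ j0 :=
    pv_find?_desc_max _ hpair j0 hj0
  have hgetD : (bLast (bWindows seq n length)).getD w 0 = j0 := by
    show ((bLast (bWindows seq n length)).get? w).getD 0 = j0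
    rw [hget, hj0]; rfl
  rw [hgetD]
  constructor
  · intro hany
    obtain ⟨j, hjmem, hjp⟩ := List.any_eq_true.mp hany
    rw [PySem.List.mem_pyRange_one] at hjmem
    have : j ≤ j0 := by
      refine hmax j ?_ ?_
      · rw [PySem.List.mem_pyRange_neg_one]; omega
      · rw [pv_window_get seq n length j (by omega) (by omega)]; exact hjp
    omega
  · intro hle
    refine List.any_eq_true.mpr ⟨j0, ?_, ?_⟩
    · rw [PySem.List.mem_pyRange_one]; omega
    · rw [hj0p]; exact beq_self_eq_true w

-- per window length, A's scan-and-count loop equals B's indexed loop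
theorem pv_inner_eq (seq : List String) (n length : Int) (h1 : 1 ≤ length)
    (hL : 0 ≤ n - length + 1) (d : PySem.Dict (List String) Int) :
    aInner seq n length d = bInner seq n length d := by
  unfold aInner bInner
  rw [PySem.List.enumerate_eq_map_pyRange (bWindows seq n length) [], List.foldl_map,
      pv_len_windows seq n length hL]
  apply PySem.List.foldl_congr_mem
  intro acc i hi
  rw [PySem.List.mem_pyRange_one] at hi
  dsimp only
  rw [pv_window_get seq n length i hi.1 hi.2]
  exact if_congr (pv_cond_iff seq n length i h1 hi.1 hi.2) rfl rfl

theorem pv_getD_nonneg {d : PySem.Dict (List String) Int}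
    (h : ∀ kv ∈ d.items, 0 < kv.2) (k : List String) : 0 ≤ d.getD k 0 := by
  show 0 ≤ (d.get? k).getD 0
  cases hk : d.get? k with
  | none => simp
  | some v =>
    simp only [Option.getD_some]
    unfold PySem.Dict.get? at hk
    obtain ⟨p, hp, hpe⟩ := Option.map_eq_some_iff.mp hk
    have := h p (List.mem_of_find?_eq_some hp)
    omega

theorem pv_pos_bInner (seq : List String) (n length : Int)
    (d : PySem.Dict (List String) Int) (h : ∀ kv ∈ d.items, 0 < kv.2) :
    ∀ kv ∈ (bInner seq n length d).items, 0 < kv.2 := by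
  unfold bInner
  refine List.foldlRecOn (motive := fun (d : PySem.Dict (List String) Int) => ∀ kv ∈ d.items, 0 < kv.2) _ _ h ?_
  intro b hb a _
  dsimp only
  split
  · intro kv hkv
    rcases pv_mem_items_insert _ _ _ _ hkv with h1 | h2
    · exact hb _ h1
    · have := pv_getD_nonneg hb a.2
      rw [h2]; dsimp only; omega
  · exact hb

theorem pv_pos_fold (seq : List String) (m K : Int) :
    ∀ kv ∈ (((PySem.List.pyRange m K).foldl
        (fun d length => bInner seq (PySem.List.len seq) length d)
        PySem.Dict.empty : PySem.Dict (List String) Int)).items, 0 < kv.2 := by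
  refine List.foldlRecOn (motive := fun (d : PySem.Dict (List String) Int) => ∀ kv ∈ d.items, 0 < kv.2) _ _ ?_ ?_
  · intro kv hkv; simp [PySem.Dict.empty] at hkv
  · intro b hb a _
    exact pv_pos_bInner seq (PySem.List.len seq) a b hb

-- ----- tightness: inside D_, A's dict contains a zero-length key and B's never does -----

theorem pv_slice_zero (seq : List String) :
    PySem.List.slice seq (some 0) (some (0 + 0)) = [] := by
  simp [PySem.List.slice_to]

-- the count of the empty key never decreases through A's inner loop body
theorem pv_mono_inner (seq : List String) (n length : Int) (l : List Int)
    (d : PySem.Dict (List String) Int) :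
    d.getD [] 0 ≤ (l.foldl (fun d i =>
      let pattern := PySem.List.slice seq (some i) (some (i + length))
      if (PySem.List.pyRange (i + length) (n - length + 1)).any
           (fun j => PySem.List.slice seq (some j) (some (j + length)) == pattern)
      then d.modify pattern 0 (· + 1)
      else d) d).getD [] 0 := by
  refine List.foldlRecOn (motive := fun (x : PySem.Dict (List String) Int) =>
    d.getD [] 0 ≤ x.getD [] 0) _ _ le_rfl ?_
  intro b hb i _
  dsimp only
  split
  · rw [PySem.Dict.getD_modify]
    split
    · next h => rw [← h]; omega
    · exact hb
  · exact hb

theorem pv_mono_aInner (seq : List String) (n length : Int)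
    (d : PySem.Dict (List String) Int) :
    d.getD [] 0 ≤ (aInner seq n length d).getD [] 0 := by
  unfold aInner
  exact pv_mono_inner seq n length _ d

theorem pv_mono_foldA (seq : List String) (n : Int) (l : List Int)
    (d : PySem.Dict (List String) Int) :
    d.getD [] 0 ≤ ((l.foldl (fun d length => aInner seq n length d) d :
      PySem.Dict (List String) Int)).getD [] 0 := by
  refine List.foldlRecOn (motive := fun (x : PySem.Dict (List String) Int) =>
    d.getD [] 0 ≤ x.getD [] 0) _ _ le_rfl ?_
  intro b hb a _
  exact le_trans hb (pv_mono_aInner seq n a b)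

theorem pv_pos_aInner (seq : List String) (n length : Int)
    (d : PySem.Dict (List String) Int) (h : ∀ kv ∈ d.items, 0 < kv.2) :
    ∀ kv ∈ (aInner seq n length d).items, 0 < kv.2 := by
  unfold aInner
  refine List.foldlRecOn (motive := fun (d : PySem.Dict (List String) Int) =>
    ∀ kv ∈ d.items, 0 < kv.2) _ _ h ?_
  intro b hb i _
  dsimp only
  split
  · intro kv hkv
    rcases pv_mem_items_insert _ _ _ _ hkv with h1 | h2
    · exact hb _ h1
    · have := pv_getD_nonneg hb (PySem.List.slice seq (some i) (some (i + length)))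
      rw [h2]; dsimp only; omega
  · exact hb

theorem pv_pos_foldA (seq : List String) (n : Int) (l : List Int) :
    ∀ kv ∈ ((l.foldl (fun d length => aInner seq n length d) PySem.Dict.empty :
        PySem.Dict (List String) Int)).items, 0 < kv.2 := by
  refine List.foldlRecOn (motive := fun (d : PySem.Dict (List String) Int) =>
    ∀ kv ∈ d.items, 0 < kv.2) _ _ ?_ ?_
  · intro kv hkv; simp [PySem.Dict.empty] at hkv
  · intro b hb a _
    exact pv_pos_aInner seq n a b hb

-- length 0 is in A's range when min_length ≤ 0, and its first iteration counts the empty pattern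
theorem pv_step0 (seq : List String) (n : Int) (hn : 1 ≤ n)
    (d : PySem.Dict (List String) Int) (hpos : ∀ kv ∈ d.items, 0 < kv.2) :
    1 ≤ (aInner seq n 0 d).getD [] 0 := by
  unfold aInner
  rw [PySem.List.pyRange_one_cons (by omega : (0 : Int) < n - 0 + 1), List.foldl_cons]
  dsimp only
  rw [pv_slice_zero]
  have hc : ((PySem.List.pyRange (0 + 0) (n - 0 + 1)).any
      (fun j => PySem.List.slice seq (some j) (some (j + 0)) == ([] : List String))) = true := by
    refine List.any_eq_true.mpr ⟨0, ?_, ?_⟩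
    · rw [PySem.List.mem_pyRange_one]; omega
    · rw [pv_slice_zero]; exact beq_self_eq_true ([] : List String)
  rw [if_pos hc]
  refine le_trans ?_ (pv_mono_inner seq n 0 _ _)
  rw [PySem.Dict.getD_modify, if_pos rfl]
  have := pv_getD_nonneg hpos ([] : List String)
  omega

-- every key B ever inserts is a window of positive length, hence nonempty
theorem pv_keys_bInner (seq : List String) (length : Int) (h1 : 1 ≤ length)
    (hlen : length ≤ (seq.length : Int)) (d : PySem.Dict (List String) Int)
    (h : ∀ kv ∈ d.items, kv.1 ≠ ([] : List String)) :
    ∀ kv ∈ (bInner seq (PySem.List.len seq) length d).items, kv.1 ≠ ([] : List String) := by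
  unfold bInner
  refine List.foldlRecOn (motive := fun (x : PySem.Dict (List String) Int) =>
    ∀ kv ∈ x.items, kv.1 ≠ ([] : List String)) _ _ h ?_
  intro b hb a ha
  dsimp only
  split
  · intro kv hkv
    rcases pv_mem_items_insert _ _ _ _ hkv with hold | hnew
    · exact hb _ hold
    · have ha2 : a.2 ∈ bWindows seq (PySem.List.len seq) length := by
        rw [← PySem.List.map_snd_enumerate (bWindows seq (PySem.List.len seq) length) 0]
        exact List.mem_map_of_mem ha
      unfold bWindows at ha2
      obtain ⟨i, hi, hslice⟩ := List.mem_map.mp ha2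
      rw [PySem.List.mem_pyRange_one, PySem.List.len_eq] at hi
      have hlen2 : (PySem.List.slice seq (some i) (some (i + length))).length ≠ 0 := by
        rw [PySem.List.slice_toNat seq hi.1 (by omega), List.length_take, List.length_drop]
        omega
      rw [hnew]
      dsimp only
      intro hc
      rw [hc] at hslice
      exact hlen2 (by rw [hslice]; rfl)
  · exact hb

theorem pv_keys_fold (seq : List String) (m : Int) :
    ∀ kv ∈ (((PySem.List.pyRange (max m 1) (PySem.Int.floordiv (PySem.List.len seq) 2 + 1)).foldl
        (fun d length => bInner seq (PySem.List.len seq) length d) PySem.Dict.empty :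
        PySem.Dict (List String) Int)).items, kv.1 ≠ ([] : List String) := by
  refine List.foldlRecOn (motive := fun (d : PySem.Dict (List String) Int) =>
    ∀ kv ∈ d.items, kv.1 ≠ ([] : List String)) _ _ ?_ ?_
  · intro kv hkv; simp [PySem.Dict.empty] at hkv
  · intro b hb a ha
    rw [PySem.List.mem_pyRange_one, PySem.List.len_eq,
        PySem.Int.floordiv_eq_ediv_of_pos (by norm_num : (0:Int) < 2)] at ha
    refine pv_keys_bInner seq a ?_ ?_ b hb
    · have := le_max_right m 1; omega
    · omega

-- ===== VERDICT (by name: the statement is the Claim_ definition above) =====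
theorem find_repeated_subsequences_spec : Claim_unchanged_find_repeated_subsequences := by
  intro seq m _hdom hnD
  unfold D_find_repeated_subsequences at hnD
  by_cases hseq : seq = []
  · subst hseq
    simp [find_repeated_subsequences, find_repeated_subsequences_alt,
      PySem.List.pyRange_one_eq_nil (le_max_right m 1), PySem.Dict.empty]
  · have hm : 1 ≤ m := by
      by_contra hc
      exact hnD ⟨hseq, by omega⟩
    have hmax : max m 1 = m := max_eq_left hm
    have hn0 : 0 ≤ PySem.List.len seq := by
      rw [PySem.List.len_eq]; exact Int.natCast_nonneg _
    have hfd : PySem.Int.floordiv (PySem.List.len seq) 2 = PySem.List.len seq / 2 :=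
      PySem.Int.floordiv_eq_ediv_of_pos (by norm_num)
    by_cases hlt : PySem.List.len seq < m * 2
    · have hlt' : ((seq.length : Int)) < m * 2 := by rwa [PySem.List.len_eq] at hlt
      have hfd' : PySem.Int.floordiv ((seq.length : Int)) 2 = (seq.length : Int) / 2 :=
        PySem.Int.floordiv_eq_ediv_of_pos (by norm_num)
      have hnil2 : PySem.List.pyRange m ((seq.length : Int) / 2 + 1) = [] :=
        PySem.List.pyRange_one_eq_nil (by omega)
      simp [find_repeated_subsequences, find_repeated_subsequences_alt, hmax, hnil2,
        hlt', PySem.Dict.empty]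
    · simp only [find_repeated_subsequences, find_repeated_subsequences_alt, hmax]
      rw [if_neg (not_or.mpr ⟨hseq, hlt⟩)]
      have hfe : (PySem.List.pyRange m (PySem.Int.floordiv (PySem.List.len seq) 2 + 1)).foldl
            (fun d length => aInner seq (PySem.List.len seq) length d) PySem.Dict.empty
          = (PySem.List.pyRange m (PySem.Int.floordiv (PySem.List.len seq) 2 + 1)).foldl
            (fun d length => bInner seq (PySem.List.len seq) length d) PySem.Dict.empty := by
        apply PySem.List.foldl_congr_mem
        intro acc length hmem
        rw [PySem.List.mem_pyRange_one, hfd] at hmem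
        apply pv_inner_eq seq (PySem.List.len seq) length (by omega) (by omega)
      rw [hfe]
      refine List.filter_eq_self.mpr ?_
      intro kv hkv
      simpa using pv_pos_fold seq m (PySem.Int.floordiv (PySem.List.len seq) 2 + 1) kv hkv

theorem find_repeated_subsequences_changed : Claim_changed_find_repeated_subsequences := by
  unfold Claim_changed_find_repeated_subsequences; decide

theorem find_repeated_subsequences_tight : Claim_exact_find_repeated_subsequences := by
  intro seq m _hdom hD
  obtain ⟨hne, hm0⟩ := hD
  have hn1 : 1 ≤ (seq.length : Int) := by
    cases seq with
    | nil => exact absurd rfl hne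
    | cons a t =>
      have : 0 < (a :: t).length := Nat.succ_pos _
      exact_mod_cast this
  intro heq
  simp only [find_repeated_subsequences, find_repeated_subsequences_alt] at heq
  rw [if_neg (by rw [PySem.List.len_eq]; exact not_or.mpr ⟨hne, by omega⟩)] at heq
  have hged : 1 ≤ ((PySem.List.pyRange m (PySem.Int.floordiv (PySem.List.len seq) 2 + 1)).foldl
      (fun d length => aInner seq (PySem.List.len seq) length d) PySem.Dict.empty :
      PySem.Dict (List String) Int).getD [] 0 := by
    have hfd0 : 0 ≤ PySem.Int.floordiv (PySem.List.len seq) 2 := by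
      rw [PySem.List.len_eq, PySem.Int.floordiv_eq_ediv_of_pos (by norm_num : (0:Int) < 2)]
      omega
    rw [PySem.List.pyRange_one_append m 0 _ hm0 (by omega),
        PySem.List.pyRange_one_cons (by omega : (0:Int) < PySem.Int.floordiv (PySem.List.len seq) 2 + 1),
        List.foldl_append, List.foldl_cons]
    refine le_trans ?_ (pv_mono_foldA seq _ _ _)
    refine pv_step0 seq _ (by rw [PySem.List.len_eq]; omega) _ ?_
    exact pv_pos_foldA seq _ _
  obtain ⟨v, hq, hv1⟩ : ∃ v, ((PySem.List.pyRange m (PySem.Int.floordiv (PySem.List.len seq) 2 + 1)).foldl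
      (fun d length => aInner seq (PySem.List.len seq) length d) PySem.Dict.empty :
      PySem.Dict (List String) Int).get? [] = some v ∧ 1 ≤ v := by
    cases hq : ((PySem.List.pyRange m (PySem.Int.floordiv (PySem.List.len seq) 2 + 1)).foldl
        (fun d length => aInner seq (PySem.List.len seq) length d) PySem.Dict.empty :
        PySem.Dict (List String) Int).get? ([] : List String) with
    | none =>
      exact absurd hged (by rw [show ∀ (d : PySem.Dict (List String) Int) (k : List String),
        d.getD k 0 = (d.get? k).getD 0 from fun _ _ => rfl, hq]; simp)
    | some v =>
      refine ⟨v, rfl, ?_⟩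
      have h0 : ((PySem.List.pyRange m (PySem.Int.floordiv (PySem.List.len seq) 2 + 1)).foldl
          (fun d length => aInner seq (PySem.List.len seq) length d) PySem.Dict.empty :
          PySem.Dict (List String) Int).getD [] 0 = v := by
        show (Option.getD _ 0) = v
        rw [hq]; rfl
      omega
  have hmem : ((([] : List String), v)) ∈ ((PySem.List.pyRange m (PySem.Int.floordiv (PySem.List.len seq) 2 + 1)).foldl
      (fun d length => aInner seq (PySem.List.len seq) length d) PySem.Dict.empty :
      PySem.Dict (List String) Int).items := by
    unfold PySem.Dict.get? at hq
    obtain ⟨p, hp, hpe⟩ := Option.map_eq_some_iff.mp hq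
    have hkb := List.find?_some hp
    have hk : p.1 = ([] : List String) := eq_of_beq hkb
    have hmm := List.mem_of_find?_eq_some hp
    obtain ⟨p1, p2⟩ := p
    dsimp at hk hpe
    rw [hk, hpe] at hmm
    exact hmm
  have hfil : ((([] : List String), v)) ∈ List.filter (fun kv => decide (0 < kv.2))
      ((PySem.List.pyRange m (PySem.Int.floordiv (PySem.List.len seq) 2 + 1)).foldl
        (fun d length => aInner seq (PySem.List.len seq) length d) PySem.Dict.empty :
        PySem.Dict (List String) Int).items :=
    List.mem_filter.mpr ⟨hmem, decide_eq_true (by omega)⟩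
  rw [heq] at hfil
  exact pv_keys_fold seq m (([] : List String), v) hfil rfl
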